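-- pv_equiv track=rewrite | github.com/atharva-18/HackerRank-Python | encryption.py | createMat
-- ===== SOURCE A (Python) =====
-- def createMat(s, row, col):
--     mat = ['']*row
--     string = ''
--     count = 0
--     index = 0
--     s = s + ' '*((row*col)-len(s))
--     for i in s:
--         string += i
--         count += 1
--         if count == col:
--             mat[index] = string
--             string = ''
--             count = 0
--             index += 1
--     return mat
-- ===== SOURCE B (Python) =====
-- def createMat(s, row, col):
--     s = s + ' ' * (row * col - len(s))
--     return [s[i * col:(i + 1) * col] for i in range(row)]
-- ===== Notes on version B (the rewrite author's own statement) =====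
-- stated objective: idiomatic
-- what changed: B replaces A's per-character accumulator/counter/index loop with row fixed-width slices of the padded string, one slice per row index; the slicing is also measurably faster since the per-character Python-level work disappears.
-- outside the precondition, e.g. on createMat('abc', 2, -1): A returns ['', ''], B returns ['ab', '']
-- crash fix: When col >= 1 and len(s) >= (max(row,0)+1)*col, A's write mat[index] runs past mat and raises IndexError, while B returns the first row chunks of s (truncating the excess). — e.g. on createMat("abcd", 1, 2): A raises IndexError, B returns ["ab"]
import Mathlib
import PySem

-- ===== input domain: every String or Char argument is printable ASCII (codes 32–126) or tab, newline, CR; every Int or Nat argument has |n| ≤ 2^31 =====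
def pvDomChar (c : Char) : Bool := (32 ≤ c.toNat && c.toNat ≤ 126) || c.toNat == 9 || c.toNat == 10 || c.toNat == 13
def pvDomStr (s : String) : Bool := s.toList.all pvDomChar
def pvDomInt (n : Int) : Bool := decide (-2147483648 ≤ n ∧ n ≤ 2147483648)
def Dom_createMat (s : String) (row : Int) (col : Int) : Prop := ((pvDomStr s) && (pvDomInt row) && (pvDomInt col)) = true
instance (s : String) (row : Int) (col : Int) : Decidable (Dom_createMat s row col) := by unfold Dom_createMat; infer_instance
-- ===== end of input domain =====

-- B builds the matrix by row fixed-width slices of the padded string instead of A's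
-- per-character accumulator/counter/index loop (idiomatic; a timing run measured B faster).

-- ===== PORT A =====
-- shared helper: the identical padding line `s = s + ' '*((row*col)-len(s))` of both Pythons
def padChars (s : String) (row : Int) (col : Int) : List Char :=
  s.toList ++ List.replicate (row * col - (s.toList.length : Int)).toNat ' '

-- one iteration of A's `for i in s` loop; state = (mat, string, count, index)
def stepA (col : Int) (st : List String × List Char × Int × Int) (c : Char) :
    List String × List Char × Int × Int :=
  let string := st.2.1 ++ [c]
  let count := st.2.2.1 + 1
  if count = col then (st.1.set st.2.2.2.toNat (String.ofList string), [], 0, st.2.2.2 + 1)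
  else (st.1, string, count, st.2.2.2)

def createMat (s : String) (row : Int) (col : Int) : List String :=
  ((padChars s row col).foldl (stepA col) (List.replicate row.toNat "", [], 0, 0)).1

-- ===== PORT B =====
def createMat_alt (s : String) (row : Int) (col : Int) : List String :=
  let cs := padChars s row col
  (PySem.List.pyRange 0 row 1).map
    (fun i => String.ofList (PySem.List.slice cs (some (i * col)) (some ((i + 1) * col))))

-- ===== PRECONDITION & SPEC =====
-- Pre_ excludes the inputs where A's write mat[index] raises IndexError (col ≥ 1 and
-- len(s) ≥ (max(row,0)+1)*col), and the degenerate corner col < 0 with row ≥ 1 and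
-- len(s) > -col, where A's counter never fires (it returns row empty strings, an artefact
-- of its implementation) while B's first slice is nonempty.
def Pre_createMat (s : String) (row : Int) (col : Int) : Prop :=
  (0 ≤ col ∧ (col = 0 ∨ (s.toList.length : Int) < (max row 0 + 1) * col)) ∨
  (col < 0 ∧ (row ≤ 0 ∨ (s.toList.length : Int) ≤ -col))
instance (s : String) (row : Int) (col : Int) : Decidable (Pre_createMat s row col) := by
  unfold Pre_createMat; infer_instance
def pvWitness_createMat : String × Int × Int := ("ab", 2, 2)

-- When col ≥ 1 and len(s) ≥ (max(row,0)+1)*col, A raises IndexError while B returns the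
-- first row chunks of s (truncating the excess).
def Raises_createMat (s : String) (row : Int) (col : Int) : Prop :=
  1 ≤ col ∧ (max row 0 + 1) * col ≤ (s.toList.length : Int)
instance (s : String) (row : Int) (col : Int) : Decidable (Raises_createMat s row col) := by
  unfold Raises_createMat; infer_instance
def pvRaiseWitness_createMat : String × Int × Int := ("abcd", 1, 2)
def pvRaiseWitnessOut_createMat : List String := ["ab"]

def Spec_createMat (s : String) (row : Int) (col : Int) (out : List String) : Prop :=
  out = createMat_alt s row col
instance (s : String) (row : Int) (col : Int) (out : List String) :
    Decidable (Spec_createMat s row col out) := by unfold Spec_createMat; infer_instance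

-- ===== CLAIM (what is proved, stated in full; the proofs are below) =====
def Claim_equal_createMat : Prop := ∀ (s : String) (row : Int) (col : Int),
  Dom_createMat s row col → Pre_createMat s row col →
  Spec_createMat s row col (createMat s row col)

def Claim_raises_createMat : Prop :=
  (∀ (s : String) (row : Int) (col : Int), Dom_createMat s row col →
    Raises_createMat s row col → ¬ Pre_createMat s row col) ∧
  (Dom_createMat (pvRaiseWitness_createMat.1) (pvRaiseWitness_createMat.2.1) (pvRaiseWitness_createMat.2.2) ∧
   Raises_createMat (pvRaiseWitness_createMat.1) (pvRaiseWitness_createMat.2.1) (pvRaiseWitness_createMat.2.2) ∧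
   createMat_alt (pvRaiseWitness_createMat.1) (pvRaiseWitness_createMat.2.1) (pvRaiseWitness_createMat.2.2) = pvRaiseWitnessOut_createMat)

-- ===== LEMMAS AND PROOFS =====

-- one unfolding of A's loop body (the branch test `count == col` made explicit)
theorem stepA_eq (col : Int) (mat : List String) (acc : List Char) (cnt idx : Int) (c : Char) :
    stepA col (mat, acc, cnt, idx) c
      = if cnt + 1 = col then (mat.set idx.toNat (String.ofList (acc ++ [c])), ([] : List Char), (0 : Int), idx + 1)
        else (mat, acc ++ [c], cnt + 1, idx) := rfl

-- col ≤ 0: the test `count == col` never fires (count ≥ 1), so mat is unchanged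
theorem foldl_stepA_nonpos (col : Int) (hcol : col ≤ 0) (rem : List Char) :
    ∀ (mat : List String) (acc : List Char) (cnt idx : Int), 0 ≤ cnt →
    (rem.foldl (stepA col) (mat, acc, cnt, idx)).1 = mat := by
  induction rem with
  | nil => intro mat acc cnt idx _; rfl
  | cons c rest ih =>
    intro mat acc cnt idx hcnt
    rw [List.foldl_cons, stepA_eq, if_neg (by omega)]
    exact ih mat (acc ++ [c]) (cnt + 1) idx (by omega)

-- a slice whose clamped bounds both land at 0 is empty
theorem slice_nonpos_empty (cs : List Char) (a b : Int)
    (ha : a = 0 ∨ (cs.length : Int) + a ≤ 0) (hb : b = 0 ∨ (cs.length : Int) + b ≤ 0) :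
    PySem.List.slice cs (some a) (some b) = [] := by
  have clam : ∀ x : Int, (x = 0 ∨ (cs.length : Int) + x ≤ 0) →
      PySem.List.clampIdx cs.length x = 0 := by
    intro x hx
    rcases hx with h | h
    · subst h
      have h0 : ((0 : ℕ) : Int) = (0 : Int) := by norm_num
      rw [← h0, PySem.List.clampIdx_natCast]
      simp
    · rcases lt_or_eq_of_le (by omega : x ≤ 0) with hlt | heq
      · have hk : 0 < (-x).toNat := by omega
        have hx2 : x = -(((-x).toNat : ℕ) : Int) := by omega
        rw [hx2, PySem.List.clampIdx_neg_natCast _ _ hk]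
        omega
      · subst heq
        have h0 : ((0 : ℕ) : Int) = (0 : Int) := by norm_num
        rw [← h0, PySem.List.clampIdx_natCast]
        simp
  apply List.length_eq_zero_iff.mp
  rw [PySem.List.length_slice, clam a ha, clam b hb]

-- the remainder after the last full chunk: fewer than col chars never fire the test
theorem foldl_stepA_tail (col : Int) (rem : List Char) :
    ∀ (mat : List String) (acc : List Char) (cnt idx : Int), 0 ≤ cnt →
    cnt + rem.length < col →
    (rem.foldl (stepA col) (mat, acc, cnt, idx)).1 = mat := by
  induction rem with
  | nil => intro mat acc cnt idx _ _; rfl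
  | cons c rest ih =>
    intro mat acc cnt idx hcnt hlt
    rw [List.length_cons] at hlt
    rw [List.foldl_cons, stepA_eq, if_neg (by omega)]
    exact ih mat (acc ++ [c]) (cnt + 1) idx (by omega) (by omega)

-- consuming exactly one chunk writes it at position idx and resets the state
theorem foldl_stepA_consume (col : Int) (p : List Char) :
    ∀ (rest : List Char) (mat : List String) (acc : List Char) (cnt idx : Int),
    p ≠ [] → 0 ≤ cnt → cnt + p.length = col →
    (p ++ rest).foldl (stepA col) (mat, acc, cnt, idx)
      = rest.foldl (stepA col) (mat.set idx.toNat (String.ofList (acc ++ p)), [], 0, idx + 1) := by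
  induction p with
  | nil => intro _ _ _ _ _ h; exact absurd rfl h
  | cons c p' ih =>
    intro rest mat acc cnt idx _ hcnt hsum
    rw [List.length_cons] at hsum
    cases p' with
    | nil =>
      have hc1 : cnt + 1 = col := by simpa using hsum
      rw [List.cons_append, List.nil_append, List.foldl_cons, stepA_eq, if_pos hc1]
    | cons d p'' =>
      have hlen : (1 : Int) ≤ ((d :: p'').length : Int) := by simp
      rw [List.cons_append, List.foldl_cons, stepA_eq, if_neg (by omega)]
      rw [ih rest mat (acc ++ [c]) (cnt + 1) idx (by simp) (by omega) (by omega)]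
      simp

-- A's loop over k full chunks = folding the chunk writes over the row indices
theorem foldl_stepA_main (c : ℕ) (hc : 0 < c) :
    ∀ (k : ℕ) (cs : List Char) (mat : List String) (idx : Int), 0 ≤ idx →
    k * c ≤ cs.length → cs.length < k * c + c →
    (cs.foldl (stepA (c : Int)) (mat, [], 0, idx)).1
      = (List.range k).foldl
          (fun m j => m.set (idx.toNat + j) (String.ofList ((cs.drop (j * c)).take c))) mat := by
  intro k
  induction k with
  | zero =>
    intro cs mat idx _ _ hlt
    simp only [Nat.zero_mul, Nat.zero_add] at hlt
    simpa using foldl_stepA_tail (c : Int) cs mat [] 0 idx le_rfl (by omega)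
  | succ k ih =>
    intro cs mat idx hidx hle hlt
    have hsm : (k + 1) * c = k * c + c := by ring
    have hcle : c ≤ cs.length := by omega
    have hsplit : cs = cs.take c ++ cs.drop c := (List.take_append_drop c cs).symm
    have hplen : (cs.take c).length = c := by simp [Nat.min_eq_left hcle]
    have hpne : cs.take c ≠ [] := by
      intro h; rw [h] at hplen; simp at hplen; omega
    calc (cs.foldl (stepA (c : Int)) (mat, [], 0, idx)).1
        = ((cs.take c ++ cs.drop c).foldl (stepA (c : Int)) (mat, [], 0, idx)).1 := by
          rw [← hsplit]
      _ = ((cs.drop c).foldl (stepA (c : Int))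
            (mat.set idx.toNat (String.ofList ([] ++ cs.take c)), [], 0, idx + 1)).1 := by
          rw [foldl_stepA_consume (c : Int) (cs.take c) (cs.drop c) mat [] 0 idx hpne le_rfl
                (by rw [hplen]; ring)]
      _ = (List.range k).foldl
            (fun m j => m.set ((idx + 1).toNat + j) (String.ofList (((cs.drop c).drop (j * c)).take c)))
            (mat.set idx.toNat (String.ofList (cs.take c))) := by
          rw [ih (cs.drop c) _ (idx + 1) (by omega)
                (by simp only [List.length_drop]; omega)
                (by simp only [List.length_drop]; omega)]
          simp
      _ = (List.range (k + 1)).foldl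
            (fun m j => m.set (idx.toNat + j) (String.ofList ((cs.drop (j * c)).take c))) mat := by
          rw [List.range_succ_eq_map, List.foldl_cons, List.foldl_map]
          simp only [Nat.add_zero, Nat.zero_mul, List.drop_zero, Nat.succ_eq_add_one]
          congr 1
          funext m j
          have h1 : idx.toNat + (j + 1) = (idx + 1).toNat + j := by omega
          have h2 : (cs.drop c).drop (j * c) = cs.drop ((j + 1) * c) := by
            rw [List.drop_drop]; ring_nf
          rw [h1, h2]

-- writing f j into position j of a list of the right length, for all j < n, yields the map
theorem cons_setfold (l : List ℕ) :
    ∀ (x : String) (m0 : List String) (g : ℕ → String),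
    l.foldl (fun m j => m.set (j + 1) (g j)) (x :: m0)
      = x :: l.foldl (fun m j => m.set j (g j)) m0 := by
  induction l with
  | nil => intro _ _ _; rfl
  | cons j l' ih =>
    intro x m0 g
    simp only [List.foldl_cons, List.set_cons_succ]
    exact ih x (m0.set j (g j)) g

theorem setfold_eq_map (n : ℕ) :
    ∀ (mat : List String) (f : ℕ → String), mat.length = n →
    (List.range n).foldl (fun m j => m.set j (f j)) mat = (List.range n).map f := by
  induction n with
  | zero => intro mat f h; rw [List.length_eq_zero_iff.mp h]; simp
  | succ n ih =>
    intro mat f hlen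
    cases mat with
    | nil => simp at hlen
    | cons a mat' =>
      simp only [List.length_cons] at hlen
      rw [List.range_succ_eq_map, List.foldl_cons, List.map_cons, List.foldl_map, List.map_map]
      simp only [List.set_cons_zero]
      rw [cons_setfold (List.range n) (f 0) mat' (fun j => f (j + 1))]
      rw [ih mat' (fun j => f (j + 1)) (by omega)]
      rfl

-- length of the padded char list
theorem padChars_length (s : String) (row col : Int) (hrow : 0 ≤ row) (hcol : 0 ≤ col) :
    (padChars s row col).length = max s.toList.length (row.toNat * col.toNat) := by
  simp only [padChars, List.length_append, List.length_replicate]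
  have h : row * col = ((row.toNat * col.toNat : ℕ) : Int) := by
    push_cast; rw [Int.toNat_of_nonneg hrow, Int.toNat_of_nonneg hcol]
  rw [h]
  omega

-- ===== VERDICT (by name: the statement is the Claim_ definition above) =====
theorem createMat_spec : Claim_equal_createMat := by
  intro s row col _ hpre
  unfold Spec_createMat createMat createMat_alt
  rcases hpre with ⟨hcol, hpre2⟩ | ⟨hneg, hpre2⟩
  case inr =>
    -- col < 0: A's counter never fires, mat stays ['']*row; B's slices are all empty
    rw [foldl_stepA_nonpos col (by omega) (padChars s row col)
          (List.replicate row.toNat "") [] 0 0 le_rfl]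
    rcases hpre2 with hr0 | hlen
    · rw [PySem.List.pyRange_one_eq_nil (by omega)]
      simp [Int.toNat_of_nonpos hr0]
    · rw [PySem.List.pyRange_one 0 row]
      simp only [List.map_map, Int.sub_zero]
      symm
      rw [List.eq_replicate_iff]
      refine ⟨by simp, ?_⟩
      intro b hb
      simp only [List.mem_map] at hb
      obtain ⟨j, hjmem, hj⟩ := hb
      have hjr : (j : Int) < row := by
        have := List.mem_range.mp hjmem
        omega
      have hrow1 : 1 ≤ row := by omega
      have hpad : (row * col - (s.toList.length : Int)).toNat = 0 := by
        have h1 : row * col ≤ col := by nlinarith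
        omega
      have hcseq : padChars s row col = s.toList := by
        simp only [padChars]; rw [hpad]; simp
      have hsl : PySem.List.slice (padChars s row col) (some ((0 + (j : Int)) * col))
          (some ((0 + (j : Int) + 1) * col)) = [] := by
        apply slice_nonpos_empty
        · rcases Nat.eq_zero_or_pos j with hj0 | hj1
          · left; rw [hj0]; ring
          · right
            rw [hcseq]
            have h2 : (0 + (j : Int)) * col ≤ col := by nlinarith [Int.toNat_of_nonneg (by positivity : (0:Int) ≤ (j:Int))]
            omega
        · right
          rw [hcseq]
          have h2 : (0 + (j : Int) + 1) * col ≤ col := by nlinarith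
          omega
      rw [← hj]
      simp only [Function.comp]
      rw [hsl]
  rcases hpre2 with hc0 | hlt
  · -- col = 0: A leaves mat = ['']*row; B maps empty slices over range(row)
    subst hc0
    rw [foldl_stepA_nonpos 0 le_rfl (padChars s row 0) (List.replicate row.toNat "") [] 0 0 le_rfl]
    rw [PySem.List.pyRange_one 0 row]
    simp only [List.map_map, Int.sub_zero]
    symm
    rw [List.eq_replicate_iff]
    refine ⟨by simp, ?_⟩
    intro b hb
    simp only [List.mem_map] at hb
    obtain ⟨j, _, hj⟩ := hb
    have hsl : PySem.List.slice (padChars s row 0) (some ((0 + (j : Int)) * 0))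
        (some ((0 + (j : Int) + 1) * 0)) = [] := by
      rw [mul_zero, mul_zero, PySem.List.slice_toNat _ le_rfl le_rfl]
      simp
    rw [← hj]
    simp only [Function.comp]
    rw [hsl]
  · by_cases hrow : 0 ≤ row
    · -- main case: 0 ≤ row, 1 ≤ col
      have hmax : max row 0 = row := by omega
      rw [hmax] at hlt
      have hcol1 : (1 : Int) ≤ col := by
        rcases lt_or_eq_of_le hcol with h | h
        · omega
        · exfalso; rw [← h] at hlt; simp at hlt; omega
      have hn := padChars_length s row col hrow hcol
      set c := col.toNat with hc
      set k := row.toNat with hk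
      have hcpos : 0 < c := by omega
      have hcolc : col = (c : Int) := by omega
      have hrowk : row = (k : Int) := by omega
      set cs := padChars s row col with hcs
      have e1 : (row + 1) * col = (((k + 1) * c : ℕ) : Int) := by
        rw [hrowk, hcolc]; push_cast; ring
      have hltN : s.toList.length < (k + 1) * c := by
        rw [e1] at hlt; exact_mod_cast hlt
      have hsm : (k + 1) * c = k * c + c := by ring
      have hle : k * c ≤ cs.length := by omega
      have hlt2 : cs.length < k * c + c := by omega
      -- A's side
      rw [hcolc]
      rw [foldl_stepA_main c hcpos k cs (List.replicate k "") 0 le_rfl hle hlt2]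
      simp only [Int.toNat_zero, Nat.zero_add]
      rw [setfold_eq_map k (List.replicate k "")
            (fun j => String.ofList ((cs.drop (j * c)).take c)) (by simp)]
      -- B's side
      rw [PySem.List.pyRange_one 0 row, List.map_map]
      simp only [Int.sub_zero, hrowk, Int.toNat_natCast]
      apply List.map_congr_left
      intro j _
      simp only [Function.comp]
      have h1 : ((0 : Int) + (j : Int)) * (c : Int) = ((j * c : ℕ) : Int) := by push_cast; ring
      have h2 : ((0 : Int) + (j : Int) + 1) * (c : Int) = (((j + 1) * c : ℕ) : Int) := by
        push_cast; ring
      rw [h1, h2, PySem.List.slice_natCast]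
      have h3 : (j + 1) * c - j * c = c := by ring_nf; omega
      rw [h3]
    · -- row < 0, col ≥ 1: no padding, fewer than col chars, A returns [], B maps over empty range
      have hmax : max row 0 = 0 := by omega
      rw [hmax] at hlt
      have hcol1 : (1 : Int) ≤ col := by
        rcases lt_or_eq_of_le hcol with h | h
        · omega
        · exfalso; rw [← h] at hlt; simp at hlt; omega
      have hpad : (row * col - (s.toList.length : Int)).toNat = 0 := by
        have h1 : row * col ≤ -col := by nlinarith
        omega
      have hcseq : padChars s row col = s.toList := by
        simp only [padChars]; rw [hpad]; simp
      have hcslen : (0 : Int) + ((padChars s row col).length : Int) < col := by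
        rw [hcseq]; simp at hlt ⊢; omega
      rw [foldl_stepA_tail col (padChars s row col) _ [] 0 0 le_rfl hcslen]
      rw [PySem.List.pyRange_one_eq_nil (by omega)]
      simp [Int.toNat_of_nonpos (by omega : row ≤ 0)]

@[simp]
theorem createMat_raises : Claim_raises_createMat := by
  unfold Claim_raises_createMat
  constructor
  · intro s row col _ hr hp
    obtain ⟨h1, h2⟩ := hr
    rcases hp with ⟨h3, h4⟩ | ⟨h3, h4⟩
    · rcases h4 with h | h <;> omega
    · omega
  · exact ⟨by decide, by decide, by decide⟩
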